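-- pv_equiv track=rewrite | github.com/Zuhye/PythonAlgorithm | 2023 Test/Gabia/question_2.py | solution
-- ===== SOURCE A (Python) =====
-- def solution(n):
--     answer = 0
--
--     if n == 2:
--         answer = 1
--
--     if n % 2 == 0 and n > 2:
--         # answer += 3 # 1, 2인 경우
--         for i in range(2, n - 1):
--             answer += 2 * (i ** 2)
--         answer += (n - 1) ** 2 + 3
--
--     if n % 2 != 0:
--         for i in range(1, n-1):
--             if i % 2 != 0:
--                 answer += 2*(i**2)
--             else:
--                 answer += i**2 + 2*(i**2)
--         answer += (n-1) ** 2
--     return answer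
-- ===== SOURCE B (Python) =====
-- def solution(n):
--     # closed-form: sum of squares 1..m is m(m+1)(2m+1)//6; O(1) instead of A's O(n) loop
--     def S(m):
--         return m * (m + 1) * (2 * m + 1) // 6 if m > 0 else 0
--     if n % 2 == 0:
--         if n == 2:
--             return 1
--         if n > 2:
--             return 2 * (S(n - 2) - 1) + (n - 1) ** 2 + 3
--         return 0
--     if n >= 3:
--         return 2 * S(n - 2) + 4 * S((n - 3) // 2) + (n - 1) ** 2
--     return (n - 1) ** 2
-- ===== Notes on version B (the rewrite author's own statement) =====
-- stated objective: faster
-- what changed: Replaced A's O(n) accumulation loops with the closed-form sum-of-squares formula m(m+1)(2m+1)//6 applied per parity case, making the function O(1).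
import Mathlib
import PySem

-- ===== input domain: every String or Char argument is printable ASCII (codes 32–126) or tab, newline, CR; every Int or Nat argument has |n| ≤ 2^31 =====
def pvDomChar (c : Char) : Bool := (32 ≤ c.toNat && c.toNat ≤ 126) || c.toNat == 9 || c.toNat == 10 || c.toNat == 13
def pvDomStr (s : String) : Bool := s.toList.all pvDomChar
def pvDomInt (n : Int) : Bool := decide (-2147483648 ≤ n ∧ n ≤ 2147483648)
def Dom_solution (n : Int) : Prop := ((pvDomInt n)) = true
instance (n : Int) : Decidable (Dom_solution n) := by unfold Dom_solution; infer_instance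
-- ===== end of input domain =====

-- B replaces A's O(n) summation loops by the closed-form sum-of-squares formula m(m+1)(2m+1)//6 (O(1), asymptotically faster).


-- ===== PORT A =====
def solution (n : Int) : Int :=
  let answer : Int := 0
  let answer : Int := if n = 2 then 1 else answer
  let answer : Int :=
    if PySem.Int.mod n 2 = 0 ∧ n > 2 then
      ((PySem.List.pyRange 2 (n - 1) 1).foldl (fun a i => a + 2 * i ^ 2) answer) + (n - 1) ^ 2 + 3
    else answer
  let answer : Int :=
    if PySem.Int.mod n 2 ≠ 0 then
      ((PySem.List.pyRange 1 (n - 1) 1).foldl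
        (fun a i => if PySem.Int.mod i 2 ≠ 0 then a + 2 * i ^ 2 else a + (i ^ 2 + 2 * i ^ 2))
        answer) + (n - 1) ^ 2
    else answer
  answer

-- ===== PORT B =====
-- closed-form sum of squares 1..m (Python: m*(m+1)*(2*m+1)//6 if m > 0 else 0)
def sqSum (m : Int) : Int :=
  if m > 0 then PySem.Int.floordiv (m * (m + 1) * (2 * m + 1)) 6 else 0

def solution_alt (n : Int) : Int :=
  if PySem.Int.mod n 2 = 0 then
    if n = 2 then 1
    else if n > 2 then 2 * (sqSum (n - 2) - 1) + (n - 1) ^ 2 + 3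
    else 0
  else if n ≥ 3 then
    2 * sqSum (n - 2) + 4 * sqSum (PySem.Int.floordiv (n - 3) 2) + (n - 1) ^ 2
  else (n - 1) ^ 2

-- ===== PRECONDITION & SPEC =====
def Spec_solution (n : Int) (out : Int) : Prop := out = solution_alt n
instance (n : Int) (out : Int) : Decidable (Spec_solution n out) := by unfold Spec_solution; infer_instance

-- ===== CLAIM (what is proved, stated in full; the proofs are below) =====
def Claim_equal_solution : Prop := ∀ (n : Int), Dom_solution n → Spec_solution n (solution n)

-- ===== LEMMAS AND PROOFS =====

-- recursive sum of squares 1..k (proof-only)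
def F : Nat → Int
  | 0 => 0
  | k + 1 => F k + ((k : Int) + 1) ^ 2

theorem six_F (k : Nat) : 6 * F k = (k : Int) * ((k : Int) + 1) * (2 * (k : Int) + 1) := by
  induction k with
  | zero => simp [F]
  | succ k ih =>
    simp only [F]
    push_cast
    linear_combination ih

theorem floordiv_six_exact (q : Int) : PySem.Int.floordiv (6 * q) 6 = q := by
  rw [PySem.Int.floordiv_eq_ediv_of_pos (by norm_num)]
  exact Int.mul_ediv_cancel_left q (by norm_num)

theorem sqSum_nat (k : Nat) : sqSum (k : Int) = F k := by
  cases k with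
  | zero => simp [sqSum, F]
  | succ k =>
    have hpos : ((k + 1 : Nat) : Int) > 0 := by positivity
    have h6 : ((k + 1 : Nat) : Int) * (((k + 1 : Nat) : Int) + 1) * (2 * ((k + 1 : Nat) : Int) + 1)
        = 6 * F (k + 1) := (six_F (k + 1)).symm
    rw [sqSum, if_pos hpos, h6, floordiv_six_exact]

theorem loopE (v : Int) (k : Nat) :
    (PySem.List.pyRange 2 (2 + (k : Int)) 1).foldl (fun a i => a + 2 * i ^ 2) v
      = v + 2 * (F (k + 1) - 1) := by
  induction k with
  | zero => simp [PySem.List.pyRange_one_eq_nil, F]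
  | succ k ih =>
    have h : (2 : Int) + ((k + 1 : Nat) : Int) = (2 + (k : Int)) + 1 := by push_cast; ring
    rw [h, PySem.List.pyRange_one_succ_right (by omega), List.foldl_append, ih]
    simp only [List.foldl_cons, List.foldl_nil, F]
    push_cast
    ring

theorem loopO (v : Int) (k : Nat) :
    (PySem.List.pyRange 1 (1 + (k : Int)) 1).foldl
      (fun a i => if PySem.Int.mod i 2 ≠ 0 then a + 2 * i ^ 2 else a + (i ^ 2 + 2 * i ^ 2)) v
      = v + 2 * F k + 4 * F (k / 2) := by
  induction k with
  | zero => simp [PySem.List.pyRange_one_eq_nil, F]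
  | succ k ih =>
    have h : (1 : Int) + ((k + 1 : Nat) : Int) = (1 + (k : Int)) + 1 := by push_cast; ring
    rw [h, PySem.List.pyRange_one_succ_right (by omega), List.foldl_append, ih]
    simp only [List.foldl_cons, List.foldl_nil]
    have hm : PySem.Int.mod (1 + (k : Int)) 2 = (1 + (k : Int)) % 2 :=
      PySem.Int.mod_eq_emod_of_pos (by norm_num)
    rcases Nat.even_or_odd k with he | ho
    · obtain ⟨j, hj⟩ := he
      have hmv : PySem.Int.mod (1 + (k : Int)) 2 = 1 := by rw [hm]; omega
      rw [if_pos (by rw [hmv]; norm_num)]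
      have hd : (k + 1) / 2 = k / 2 := by omega
      simp only [hd, F]
      ring
    · obtain ⟨j, hj⟩ := ho
      have hmv : PySem.Int.mod (1 + (k : Int)) 2 = 0 := by rw [hm]; omega
      rw [if_neg (by rw [hmv]; simp)]
      have hd : (k + 1) / 2 = k / 2 + 1 := by omega
      have hj2 : k / 2 = j := by omega
      simp only [hd, hj2, F]
      subst hj
      push_cast
      ring

theorem solution_eq (n : Int) : solution n = solution_alt n := by
  by_cases hm : PySem.Int.mod n 2 = 0
  · -- even n
    have hnn : ¬ PySem.Int.mod n 2 ≠ 0 := fun h => h hm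
    by_cases h2 : n = 2
    · subst h2; decide
    · by_cases hgt : n > 2
      · -- even n > 2
        have hemod : n % 2 = 0 := by
          have := PySem.Int.mod_eq_emod_of_pos (a := n) (b := 2) (by norm_num)
          omega
        have hk : ∃ k : Nat, n - 1 = 2 + (k : Int) ∧ n - 2 = ((k + 1 : Nat) : Int) := by
          refine ⟨(n - 3).toNat, by omega, by push_cast; omega⟩
        obtain ⟨k, hk1, hk2⟩ := hk
        simp only [solution, solution_alt]
        rw [if_neg h2, if_pos (And.intro hm hgt), if_neg hnn, if_pos hm, if_neg h2, if_pos hgt]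
        rw [hk1, loopE, hk2, sqSum_nat]
        ring
      · -- even n, n < 2 (both loops disabled)
        simp only [solution, solution_alt]
        rw [if_neg h2, if_neg (show ¬(PySem.Int.mod n 2 = 0 ∧ n > 2) from fun h => hgt h.2), if_neg hnn, if_pos hm, if_neg h2, if_neg hgt]
  · -- odd n
    have hemod : n % 2 = 1 := by
      have h := PySem.Int.mod_eq_emod_of_pos (a := n) (b := 2) (by norm_num)
      omega
    have h2 : n ≠ 2 := by omega
    simp only [solution, solution_alt]
    rw [if_neg h2, if_neg (show ¬(PySem.Int.mod n 2 = 0 ∧ n > 2) from fun h => hm h.1), if_pos hm, if_neg hm]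
    by_cases h3 : n ≥ 3
    · -- odd n ≥ 3
      have hk : ∃ k : Nat, n - 1 = 1 + (k : Int) ∧ n - 2 = (k : Int) := by
        refine ⟨(n - 2).toNat, by omega, by omega⟩
      obtain ⟨k, hk1, hk2⟩ := hk
      rw [if_pos h3, hk1, loopO, hk2, sqSum_nat]
      have hfd : PySem.Int.floordiv (n - 3) 2 = ((k / 2 : Nat) : Int) := by
        rw [PySem.Int.floordiv_eq_ediv_of_pos (by norm_num)]
        omega
      rw [hfd, sqSum_nat]
      ring
    · -- odd n < 3: loop range empty
      rw [if_neg h3, PySem.List.pyRange_one_eq_nil (by omega)]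
      simp

-- ===== VERDICT (by name: the statement is the Claim_ definition above) =====
theorem solution_spec : Claim_equal_solution := by
  intro n _
  unfold Spec_solution
  exact solution_eq n
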